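-- pv_equiv track=rewrite | github.com/phatakshaunak/scaler_academy | DSA_Problem_Solving/Intro_Arrays/special_subsequences_count.py | solve
-- ===== SOURCE A (Python) =====
-- def solve(A):
--     c_a = 0
--     count = 0
--
--     for i in A:
--         if i == 'A':
--             c_a += 1
--
--         elif i == 'G':
--             count += c_a
--
--     # c_g = 0
--     # for i in range(len(A)-1,-1,-1):
--     #     if A[i] == 'G':
--     #         c_g += 1
--     #     elif A[i] == 'A':
--     #         count += c_g
--
--     return count % (int(1e9+7))
-- ===== SOURCE B (Python) =====
-- def solve(A):
--     # divide and conquer: rec(s) = (#A, #G, #pairs A-before-G) with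
--     # merge rule pairs(l+r) = pairs(l) + pairs(r) + #A(l) * #G(r)
--     def rec(lo, hi):
--         if hi - lo == 0:
--             return (0, 0, 0)
--         if hi - lo == 1:
--             x = A[lo]
--             return (1 if x == 'A' else 0, 1 if x == 'G' else 0, 0)
--         mid = (lo + hi) // 2
--         a1, g1, p1 = rec(lo, mid)
--         a2, g2, p2 = rec(mid, hi)
--         return (a1 + a2, g1 + g2, p1 + p2 + a1 * g2)
--     return rec(0, len(A))[2] % (10**9 + 7)
-- ===== Notes on version B (the rewrite author's own statement) =====
-- stated objective: alternative
-- what changed: B replaces A's single forward accumulator scan by a divide-and-conquer recursion: split the sequence in half, count (#A, #G, pairs) in each half and merge with pairs = pL + pR + #A(left)*#G(right).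
import Mathlib
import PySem

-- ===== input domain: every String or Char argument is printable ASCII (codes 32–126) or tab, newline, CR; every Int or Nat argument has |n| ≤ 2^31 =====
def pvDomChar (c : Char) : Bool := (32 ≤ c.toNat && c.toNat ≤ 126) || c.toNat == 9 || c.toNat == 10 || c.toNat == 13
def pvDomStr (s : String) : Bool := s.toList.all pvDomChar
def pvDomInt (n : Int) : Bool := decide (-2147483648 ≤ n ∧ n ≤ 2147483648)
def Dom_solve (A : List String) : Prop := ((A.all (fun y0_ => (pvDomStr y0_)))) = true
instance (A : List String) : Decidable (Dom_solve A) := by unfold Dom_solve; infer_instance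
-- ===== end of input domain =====

-- B replaces A's single forward accumulator scan by a divide-and-conquer recursion
-- (split in half, merge (#A, #G, pairs) with pairs = pL + pR + #A(left)*#G(right)).

-- ===== PORT A =====
def solve (A : List String) : Int :=
  let s := A.foldl (fun (s : Int × Int) i =>
    if i = "A" then (s.1 + 1, s.2)
    else if i = "G" then (s.1, s.2 + s.1)
    else s) (0, 0)
  PySem.Int.mod s.2 (10 ^ 9 + 7)

-- ===== PORT B =====
-- rec(lo, hi) of Source B, on the segment as a list; the half split mid = (lo+hi)//2
-- corresponds exactly to taking the first (length/2) elements of the segment.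
def solveRec : List String → Int × Int × Int
  | [] => (0, 0, 0)
  | [x] => ((if x = "A" then 1 else 0), (if x = "G" then 1 else 0), 0)
  | x :: y :: t =>
    let s := x :: y :: t
    let m := s.length / 2
    let l := solveRec (s.take m)
    let r := solveRec (s.drop m)
    (l.1 + r.1, l.2.1 + r.2.1, l.2.2 + r.2.2 + l.1 * r.2.1)
termination_by s => s.length
decreasing_by
  · simp [List.length_take]; omega
  · simp; omega

def solve_alt (A : List String) : Int :=
  PySem.Int.mod (solveRec A).2.2 (10 ^ 9 + 7)

-- ===== PRECONDITION & SPEC =====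
def Spec_solve (A : List String) (out : Int) : Prop := out = solve_alt A
instance (A : List String) (out : Int) : Decidable (Spec_solve A out) := by unfold Spec_solve; infer_instance

-- ===== CLAIM (what is proved, stated in full; the proofs are below) =====
def Claim_equal_solve : Prop := ∀ (A : List String), Dom_solve A → Spec_solve A (solve A)

-- ===== LEMMAS AND PROOFS =====

def cntA : List String → Int
  | [] => 0
  | x :: t => (if x = "A" then 1 else 0) + cntA t

def cntG : List String → Int
  | [] => 0
  | x :: t => (if x = "G" then 1 else 0) + cntG t

-- pairs with "A" strictly before "G"
def fpairs : List String → Int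
  | [] => 0
  | x :: t => (if x = "A" then cntG t else 0) + fpairs t

theorem fwd_fold (l : List String) (a c : Int) :
    l.foldl (fun (s : Int × Int) i =>
      if i = "A" then (s.1 + 1, s.2)
      else if i = "G" then (s.1, s.2 + s.1)
      else s) (a, c) = (a + cntA l, c + fpairs l + a * cntG l) := by
  induction l generalizing a c with
  | nil => simp [cntA, fpairs, cntG]
  | cons x t ih =>
    simp only [List.foldl_cons, cntA, fpairs, cntG]
    by_cases hA : x = "A"
    · rw [if_pos hA, ih]
      have hG : ¬ x = "G" := by subst hA; decide
      rw [if_pos hA, if_pos hA, if_neg hG]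
      refine Prod.ext ?_ ?_ <;> simp <;> ring
    · by_cases hG : x = "G"
      · rw [if_neg hA, if_pos hG, ih, if_neg hA, if_neg hA, if_pos hG]
        refine Prod.ext ?_ ?_ <;> simp <;> ring
      · rw [if_neg hA, if_neg hG, ih, if_neg hA, if_neg hA, if_neg hG]
        refine Prod.ext ?_ ?_ <;> simp <;> ring

theorem cntA_append (l r : List String) : cntA (l ++ r) = cntA l + cntA r := by
  induction l with
  | nil => simp [cntA]
  | cons x t ih => simp [cntA, ih]; ring_nf

theorem cntG_append (l r : List String) : cntG (l ++ r) = cntG l + cntG r := by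
  induction l with
  | nil => simp [cntG]
  | cons x t ih => simp [cntG, ih]; ring

theorem fpairs_append (l r : List String) :
    fpairs (l ++ r) = fpairs l + fpairs r + cntA l * cntG r := by
  induction l with
  | nil => simp [fpairs, cntA]
  | cons x t ih =>
    simp only [List.cons_append, fpairs, cntA, ih, cntG_append]
    by_cases hx : x = "A" <;> simp [hx] <;> ring

theorem solveRec_eq (s : List String) :
    solveRec s = (cntA s, cntG s, fpairs s) := by
  fun_induction solveRec s with
  | case1 => simp [cntA, cntG, fpairs]
  | case2 x => simp [cntA, cntG, fpairs]
  | case3 x y t s m l r ihl ihr =>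
    simp only [l, r, s, m, ihl, ihr]
    have h := List.take_append_drop ((x :: y :: t).length / 2) (x :: y :: t)
    conv_rhs => rw [← h]
    rw [cntA_append, cntG_append, fpairs_append]

-- ===== VERDICT (by name: the statement is the Claim_ definition above) =====
theorem solve_spec : Claim_equal_solve := by
  intro A _
  unfold Spec_solve solve solve_alt
  rw [fwd_fold, solveRec_eq]
  simp
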